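-- pv_equiv track=rewrite | github.com/jalddak/ps_training | python/baekjoon/2023/17140.py | col_calc
-- ===== SOURCE A (Python) =====
-- def col_calc(board):
--     longest = 0
--     row_len = len(board)
--     col_len = len(board[0])
--     col_matrix = []
--     for i in range(col_len):
--         num_dict = {}
--         for j in range(row_len):
--             num = board[j][i]
--             if num > 0:
--                 if num in num_dict:
--                     num_dict[num] += 1
--                 else:
--                     num_dict[num] = 1
--         num_list = list(num_dict.items())
--         num_list.sort(key = lambda x: (x[1], x[0]))
--         num_list = list(map(list, num_list))
--         num_list = sum(num_list, [])
--         longest = max(longest, len(num_list))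
--         col_matrix.append(num_list)
--     for i in range(col_len):
--         for _ in range(longest - len(col_matrix[i])):
--             col_matrix[i].append(0)
--     board = [[0 for _ in range(col_len)] for _ in range(longest)]
--     for i in range(longest):
--         for j in range(col_len):
--             board[i][j] = col_matrix[j][i]
--     return board
-- ===== SOURCE B (Python) =====
-- def col_calc(board):
--     cols = []
--     for i in range(len(board[0])):
--         vals = sorted(row[i] for row in board if row[i] > 0)
--         pairs = []
--         start = 0
--         while start < len(vals):
--             end = start
--             while end < len(vals) and vals[end] == vals[start]:
--                 end += 1
--             pairs.append((vals[start], end - start))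
--             start = end
--         pairs.sort(key=lambda p: (p[1], p[0]))
--         cols.append([x for p in pairs for x in p])
--     longest = max(map(len, cols), default=0)
--     return [[c[k] if k < len(c) else 0 for c in cols] for k in range(longest)]
-- ===== Notes on version B (the rewrite author's own statement) =====
-- stated objective: alternative
-- what changed: B counts each column by sorting it and run-length-encoding the runs of equal positive values (no dict/Counter), and builds the result by writing each output cell directly from the sorted (value, count) pairs, dropping A's intermediate col_matrix, its zero-padding loop and its index-swapping transpose loop.
import Mathlib
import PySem

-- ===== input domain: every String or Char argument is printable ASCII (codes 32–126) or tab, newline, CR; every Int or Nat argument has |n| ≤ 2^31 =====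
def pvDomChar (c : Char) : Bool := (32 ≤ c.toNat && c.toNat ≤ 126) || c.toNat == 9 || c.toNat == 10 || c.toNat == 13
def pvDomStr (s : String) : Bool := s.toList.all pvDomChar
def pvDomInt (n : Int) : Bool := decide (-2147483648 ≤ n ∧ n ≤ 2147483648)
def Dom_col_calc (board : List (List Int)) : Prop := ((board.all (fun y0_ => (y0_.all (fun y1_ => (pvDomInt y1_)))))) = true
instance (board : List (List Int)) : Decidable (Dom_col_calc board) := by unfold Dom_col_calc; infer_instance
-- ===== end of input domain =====

-- B replaces A's dict-counting and flatten/pad/transpose pipeline: it sorts each column and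
-- run-length-encodes the runs into (value, count) pairs, then fills each output cell directly,
-- with no intermediate padded matrix; objective: alternative (same asymptotic cost).

-- ===== PORT A =====
def col_calc (board : List (List Int)) : List (List Int) :=
  let row_len : Int := board.length
  let col_len : Int := (PySem.List.pyGetD board 0 []).length   -- board[0]: IndexError on [] is excluded by Pre_
  -- first loop: builds (longest, col_matrix)
  let st := (PySem.List.pyRange 0 col_len).foldl
    (fun st i =>
      let num_dict := (PySem.List.pyRange 0 row_len).foldl
        (fun d j =>
          let num := PySem.List.pyGetD (PySem.List.pyGetD board j []) i 0  -- board[j][i]: in range under Pre_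
          if num > 0 then
            if d.contains num then d.insert num (d.getD num 0 + 1) else d.insert num 1
          else d)
        PySem.Dict.empty
      let num_list := PySem.List.sorted2 num_dict.items (fun p => p.2) (fun p => p.1)
      let flat := num_list.foldl (fun acc p => acc ++ [p.1, p.2]) []   -- sum(map(list, num_list), [])
      (max st.1 (flat.length : Int), st.2 ++ [flat]))
    ((0 : Int), ([] : List (List Int)))
  let longest := st.1
  -- pad loop: col_matrix has exactly col_len entries, so the index loop appending zeros to col_matrix[i] is this map
  let col_matrix := st.2.map (fun c => c ++ List.replicate (longest - (c.length : Int)).toNat 0)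
  -- the final loops fill a fresh longest × col_len zero matrix completely with board[i][j] = col_matrix[j][i]
  (PySem.List.pyRange 0 longest).map (fun i =>
    (PySem.List.pyRange 0 col_len).map (fun j =>
      PySem.List.pyGetD (PySem.List.pyGetD col_matrix j []) i 0))

-- ===== PORT B =====
-- run-length encoding of Source B's inner while loops: consume the run of the head value, recurse on the rest
def rle (l : List Int) : List (Int × Int) :=
  match l with
  | [] => []
  | v :: t => (v, 1 + ((t.takeWhile (· == v)).length : Int)) :: rle (t.dropWhile (· == v))
termination_by l.length
decreasing_by
  have := List.length_dropWhile_le (· == v) t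
  simp; omega

def col_calc_alt (board : List (List Int)) : List (List Int) :=
  let cols := (PySem.List.pyRange 0 ((PySem.List.pyGetD board 0 []).length : Int)).map (fun i =>
    let vals := PySem.List.sorted
      ((board.filter (fun row => PySem.List.pyGetD row i 0 > 0)).map (fun row => PySem.List.pyGetD row i 0))
      (fun x => x)
    let pairs := PySem.List.sorted2 (rle vals) (fun p => p.2) (fun p => p.1)
    pairs.flatMap (fun p => [p.1, p.2]))
  let longest : Int := PySem.List.maxD (cols.map (fun c => (c.length : Int))) (fun x => x) 0
  (PySem.List.pyRange 0 longest).map (fun k =>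
    cols.map (fun c => if k < (c.length : Int) then PySem.List.pyGetD c k 0 else 0))

-- ===== PRECONDITION & SPEC =====
-- Pre_ excludes exactly the inputs where Python A raises IndexError: the empty board (board[0]),
-- and ragged boards where some row is shorter than row 0 (board[j][i]).
def Pre_col_calc (board : List (List Int)) : Prop :=
  board ≠ [] ∧ ∀ row ∈ board, (board.headD []).length ≤ row.length
instance (board : List (List Int)) : Decidable (Pre_col_calc board) := by unfold Pre_col_calc; infer_instance
def pvWitness_col_calc : List (List Int) := [[1, 2], [1, 3]]

def Spec_col_calc (board : List (List Int)) (out : List (List Int)) : Prop := out = col_calc_alt board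
instance (board : List (List Int)) (out : List (List Int)) : Decidable (Spec_col_calc board out) := by unfold Spec_col_calc; infer_instance

-- ===== CLAIM (what is proved, stated in full; the proofs are below) =====
def Claim_equal_col_calc : Prop := ∀ (board : List (List Int)), Dom_col_calc board → Pre_col_calc board → Spec_col_calc board (col_calc board)

-- ===== LEMMAS AND PROOFS =====

-- the positive values of column i, in row order (shared characterisation of both counting loops)
def colVals (board : List (List Int)) (i : Int) : List Int :=
  (board.map (fun row => PySem.List.pyGetD row i 0)).filter (fun v => v > 0)

def colStep (i : Int) (d : PySem.Dict Int Int) (row : List Int) : PySem.Dict Int Int :=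
  if PySem.List.pyGetD row i 0 > 0 then
    d.insert (PySem.List.pyGetD row i 0) (d.getD (PySem.List.pyGetD row i 0) 0 + 1)
  else d

lemma getD_not_contains (d : PySem.Dict Int Int) (k : Int) (h : d.contains k = false) :
    d.getD k 0 = 0 := by
  unfold PySem.Dict.contains at h
  unfold PySem.Dict.getD PySem.Dict.get?
  simp [List.any_eq_false] at h
  rw [List.find?_eq_none.mpr]
  · rfl
  · intro x hx; simpa using h x.1 x.2 hx

lemma stepA_eq (i : Int) (d : PySem.Dict Int Int) (row : List Int) :
    (let num := PySem.List.pyGetD row i 0;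
     if num > 0 then
       if d.contains num then d.insert num (d.getD num 0 + 1) else d.insert num 1
     else d) = colStep i d row := by
  unfold colStep
  by_cases h1 : PySem.List.pyGetD row i 0 > 0 <;> simp [h1]
  intro hc
  rw [getD_not_contains _ _ hc]
  norm_num

-- A's inner counting loop is Counter(column positives)
lemma dictA_eq (board : List (List Int)) (i : Int) :
    (PySem.List.pyRange 0 (board.length : Int)).foldl
      (fun d j =>
        let num := PySem.List.pyGetD (PySem.List.pyGetD board j []) i 0
        if num > 0 then
          if d.contains num then d.insert num (d.getD num 0 + 1) else d.insert num 1
        else d)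
      PySem.Dict.empty = PySem.Dict.counter (colVals board i) := by
  simp only [stepA_eq]
  rw [PySem.List.foldl_pyRange_zero_pyGetD' board [] (colStep i) _]
  unfold colVals
  have h1 : board.foldl (colStep i) PySem.Dict.empty
      = (board.map (fun row => PySem.List.pyGetD row i 0)).foldl
          (fun d v => if v > 0 then d.insert v (d.getD v 0 + 1) else d) PySem.Dict.empty := by
    rw [List.foldl_map]; rfl
  rw [h1, PySem.List.foldl_ite_eq_foldl_filter, PySem.Dict.foldl_insert_getD_add_one_eq_counter]

-- Source B's generator "row[i] for row in board if row[i] > 0" is colVals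
lemma filtmap_eq (board : List (List Int)) (i : Int) :
    (board.filter (fun row => PySem.List.pyGetD row i 0 > 0)).map (fun row => PySem.List.pyGetD row i 0)
      = colVals board i := by
  unfold colVals
  exact (List.filter_map (f := fun row => PySem.List.pyGetD row i 0)
    (p := fun v => decide (v > 0)) (l := board)).symm

-- the (count, value) order both sorts produce
def lexLE (p q : Int × Int) : Prop := p.2 < q.2 ∨ (p.2 = q.2 ∧ p.1 ≤ q.1)

lemma insertBy_pairwise (x : Int × Int) (acc : List (Int × Int)) (h : acc.Pairwise lexLE) :
    (PySem.List.insertBy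
      (fun a b => decide (a.2 < b.2) || (!decide (b.2 < a.2) && decide (a.1 < b.1))) x acc).Pairwise lexLE := by
  induction acc with
  | nil => simp [PySem.List.insertBy]
  | cons y ys ih =>
    rw [List.pairwise_cons] at h
    rw [PySem.List.insertBy]
    split
    · rename_i hlt
      simp only [Bool.or_eq_true, Bool.and_eq_true, Bool.not_eq_true', decide_eq_true_eq,
        decide_eq_false_iff_not] at hlt
      constructor
      · intro z hz
        rcases List.mem_cons.mp hz with rfl | hz'
        · unfold lexLE; omega
        · have hyz := h.1 z hz'
          unfold lexLE at hyz ⊢; omega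
      · exact List.pairwise_cons.mpr h
    · rename_i hlt
      simp only [Bool.or_eq_true, Bool.and_eq_true, Bool.not_eq_true', decide_eq_true_eq,
        decide_eq_false_iff_not, not_or, not_and] at hlt
      constructor
      · intro z hz
        rcases (PySem.List.mem_insertBy _ _ _ _).mp hz with rfl | hz'
        · unfold lexLE; omega
        · exact h.1 z hz'
      · exact ih h.2

lemma sorted2_pairwise_lex (xs : List (Int × Int)) :
    (PySem.List.sorted2 xs (fun p => p.2) (fun p => p.1)).Pairwise lexLE := by
  have key : ∀ (acc : List (Int × Int)), acc.Pairwise lexLE →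
      (xs.foldl (fun acc x => PySem.List.insertBy
        (fun a b => decide (a.2 < b.2) || (!decide (b.2 < a.2) && decide (a.1 < b.1))) x acc) acc).Pairwise lexLE := by
    induction xs with
    | nil => exact fun acc h => h
    | cons x t ih => exact fun acc h => ih _ (insertBy_pairwise x acc h)
  exact key [] List.Pairwise.nil

-- all elements after the run of v in a sorted list are strictly larger
lemma dropWhile_gt (v : Int) (t : List Int) (hle : ∀ z ∈ t, v ≤ z) (hp : t.Pairwise (· ≤ ·)) :
    ∀ z ∈ t.dropWhile (· == v), v < z := by
  induction t with
  | nil => simp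
  | cons a t' ih =>
    rw [List.pairwise_cons] at hp
    by_cases ha : (a == v) = true
    · rw [List.dropWhile_cons, if_pos ha]
      exact ih (fun z hz => hle z (List.mem_cons_of_mem _ hz)) hp.2
    · rw [List.dropWhile_cons, if_neg ha]
      intro z hz
      have hva : v < a := by
        have := hle a List.mem_cons_self
        simp at ha; omega
      rcases List.mem_cons.mp hz with rfl | hz'
      · exact hva
      · have := hp.1 z hz'; omega

lemma rle_keys_sub (l : List Int) : ∀ p ∈ rle l, p.1 ∈ l := by
  induction l using rle.induct with
  | case1 => simp [rle]
  | case2 v t ih =>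
    rw [rle]
    intro p hp
    rcases List.mem_cons.mp hp with rfl | hp'
    · exact List.mem_cons_self
    · exact List.mem_cons_of_mem _ ((List.dropWhile_sublist _).subset (ih p hp'))

lemma rle_count (l : List Int) : l.Pairwise (· ≤ ·) →
    ∀ p ∈ rle l, p.1 ∈ l ∧ p.2 = (l.count p.1 : Int) := by
  induction l using rle.induct with
  | case1 => simp [rle]
  | case2 v t ih =>
    intro hp
    rw [List.pairwise_cons] at hp
    have hgt := dropWhile_gt v t hp.1 hp.2
    have htw : ∀ z ∈ t.takeWhile (· == v), v = z := by
      intro z hz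
      have := List.mem_takeWhile_imp hz
      simp at this; omega
    have hsplit : t.takeWhile (· == v) ++ t.dropWhile (· == v) = t :=
      List.takeWhile_append_dropWhile
    have hdwp : (t.dropWhile (· == v)).Pairwise (· ≤ ·) :=
      hp.2.sublist (List.dropWhile_sublist _)
    rw [rle]
    intro p hmem
    rcases List.mem_cons.mp hmem with rfl | hmem'
    · refine ⟨List.mem_cons_self, ?_⟩
      have h1 : (t.takeWhile (· == v)).count v = (t.takeWhile (· == v)).length :=
        List.count_eq_length.mpr htw
      have h2 : (t.dropWhile (· == v)).count v = 0 :=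
        List.count_eq_zero.mpr (fun h => absurd (hgt v h) (lt_irrefl v))
      have hc : (v :: t).count v = (t.takeWhile (· == v)).length + 1 := by
        rw [List.count_cons_self]
        conv_lhs => rw [← hsplit]
        rw [List.count_append, h1, h2]
      simp only [hc]
      push_cast
      ring
    · obtain ⟨hp1, hp2⟩ := ih hdwp p hmem'
      have hvp : v < p.1 := hgt _ hp1
      refine ⟨List.mem_cons_of_mem _ ((List.dropWhile_sublist _).subset hp1), ?_⟩
      have h0 : (t.takeWhile (· == v)).count p.1 = 0 :=
        List.count_eq_zero.mpr (fun h => absurd (htw _ h) (by omega))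
      have hc : (v :: t).count p.1 = (t.dropWhile (· == v)).count p.1 := by
        rw [List.count_cons_of_ne (by omega)]
        conv_lhs => rw [← hsplit]
        rw [List.count_append, h0]
        omega
      rw [hc]
      exact hp2

lemma rle_keys_mem (l : List Int) : ∀ v ∈ l, v ∈ (rle l).map Prod.fst := by
  induction l using rle.induct with
  | case1 => simp
  | case2 w t ih =>
    intro v hv
    rw [rle, List.map_cons]
    rcases List.mem_cons.mp hv with rfl | hv'
    · exact List.mem_cons_self
    · rw [← List.takeWhile_append_dropWhile (p := (· == w)) (l := t), List.mem_append] at hv'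
      rcases hv' with h1 | h2
      · have := List.mem_takeWhile_imp h1
        simp at this
        subst this
        exact List.mem_cons_self
      · exact List.mem_cons_of_mem _ (ih v h2)

lemma rle_keys_lt (l : List Int) : l.Pairwise (· ≤ ·) →
    ((rle l).map Prod.fst).Pairwise (· < ·) := by
  induction l using rle.induct with
  | case1 => simp [rle]
  | case2 v t ih =>
    intro hp
    rw [List.pairwise_cons] at hp
    have hgt := dropWhile_gt v t hp.1 hp.2
    have hdwp : (t.dropWhile (· == v)).Pairwise (· ≤ ·) :=
      hp.2.sublist (List.dropWhile_sublist _)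
    rw [rle, List.map_cons, List.pairwise_cons]
    refine ⟨?_, ih hdwp⟩
    intro k hk
    obtain ⟨p, hpmem, rfl⟩ := List.mem_map.mp hk
    exact hgt _ (rle_keys_sub _ p hpmem)

-- the central fact: Counter-then-sort equals sort-then-RLE-then-sort
lemma pairs_eq (xs : List Int) :
    PySem.List.sorted2 (PySem.Dict.counter xs).items (fun p => p.2) (fun p => p.1)
      = PySem.List.sorted2 (rle (PySem.List.sorted xs (fun x => x))) (fun p => p.2) (fun p => p.1) := by
  have hs : (PySem.List.sorted xs (fun x => x)).Pairwise (· ≤ ·) :=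
    PySem.List.sorted_pairwise xs (fun x => x)
  have hsp : (PySem.List.sorted xs (fun x => x)).Perm xs := PySem.List.sorted_perm xs _ _
  -- membership characterisations
  have hmemA : ∀ p : Int × Int, p ∈ (PySem.Dict.counter xs).items ↔ p.1 ∈ xs ∧ p.2 = (xs.count p.1 : Int) := by
    intro p
    rw [PySem.Dict.items_counter]
    constructor
    · intro h
      obtain ⟨k, hk, rfl⟩ := List.mem_map.mp h
      exact ⟨(PySem.Set.mem_ofList xs k).mp hk, rfl⟩
    · rintro ⟨h1, h2⟩
      exact List.mem_map.mpr ⟨p.1, (PySem.Set.mem_ofList xs p.1).mpr h1, by rw [← h2]⟩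
  have hmemB : ∀ p : Int × Int, p ∈ rle (PySem.List.sorted xs (fun x => x)) ↔ p.1 ∈ xs ∧ p.2 = (xs.count p.1 : Int) := by
    intro p
    constructor
    · intro h
      obtain ⟨h1, h2⟩ := rle_count _ hs p h
      exact ⟨hsp.mem_iff.mp h1, by rw [h2, hsp.count_eq]⟩
    · rintro ⟨h1, h2⟩
      have := rle_keys_mem _ p.1 (hsp.mem_iff.mpr h1)
      obtain ⟨q, hq, hq1⟩ := List.mem_map.mp this
      obtain ⟨_, hq2⟩ := rle_count _ hs q hq
      have hqp : q = p := by
        have : q.2 = p.2 := by rw [hq2, hq1, hsp.count_eq, ← h2]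
        exact Prod.ext hq1 this
      exact hqp ▸ hq
  -- nodup on both sides
  have hndA : ((PySem.Dict.counter xs).items).Nodup := by
    rw [PySem.Dict.items_counter]
    exact (PySem.Set.nodup_ofList xs).map (fun a b h => congrArg Prod.fst h)
  have hndB : (rle (PySem.List.sorted xs (fun x => x))).Nodup :=
    List.Nodup.of_map Prod.fst ((rle_keys_lt _ hs).imp (fun h => ne_of_lt h))
  have hperm : ((PySem.Dict.counter xs).items).Perm (rle (PySem.List.sorted xs (fun x => x))) :=
    (List.perm_ext_iff_of_nodup hndA hndB).mpr (fun p => (hmemA p).trans (hmemB p).symm)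
  have hP : (PySem.List.sorted2 (PySem.Dict.counter xs).items (fun p => p.2) (fun p => p.1)).Perm
      (PySem.List.sorted2 (rle (PySem.List.sorted xs (fun x => x))) (fun p => p.2) (fun p => p.1)) :=
    ((PySem.List.sorted2_perm _ _ _ _).trans hperm).trans (PySem.List.sorted2_perm _ _ _ _).symm
  exact List.Perm.eq_of_pairwise
    (fun p q _ _ h1 h2 => by unfold lexLE at h1 h2; exact Prod.ext (by omega) (by omega))
    (sorted2_pairwise_lex _) (sorted2_pairwise_lex _) hP

lemma maxD_map_eq_foldl (f : Int → Int) (l : List Int) (hf : ∀ x ∈ l, 0 ≤ f x) :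
    PySem.List.maxD (l.map f) (fun x => x) 0 = l.foldl (fun a i => max a (f i)) 0 := by
  cases l with
  | nil => rfl
  | cons x t =>
    unfold PySem.List.maxD
    rw [List.map_cons, PySem.List.max?_id_cons]
    simp only [Option.getD_some, List.foldl_map, List.foldl_cons]
    have : max 0 (f x) = f x := by
      have := hf x (by simp); omega
    rw [this]

lemma cell_eq (c : List Int) (m k : Nat) :
    (c ++ List.replicate m 0).getD k 0 = if k < c.length then c.getD k 0 else 0 := by
  simp only [List.getD, List.getElem?_append, List.getElem?_replicate]
  split
  · rfl
  · rename_i h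
    split <;> simp

-- ===== VERDICT (by name: the statement is the Claim_ definition above) =====
theorem col_calc_spec : Claim_equal_col_calc := by
  intro board _ _
  show col_calc board = col_calc_alt board
  simp only [col_calc, col_calc_alt, dictA_eq, filtmap_eq, pairs_eq,
    PySem.List.foldl_append_eq_flatMap, List.nil_append]
  set F := fun i : Int =>
    (PySem.List.sorted2 (rle (PySem.List.sorted (colVals board i) (fun x => x)))
      (fun p => p.2) (fun p => p.1)).flatMap (fun p => [p.1, p.2]) with hF
  set n := (PySem.List.pyGetD board 0 []).length with hn
  rw [PySem.List.foldl_prod_mk (f := fun (a : Int) i => max a ((F i).length : Int))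
      (g := fun (m : List (List Int)) i => m ++ [F i])]
  simp only [PySem.List.foldl_append_singleton_eq_map, List.nil_append, List.map_map,
    Function.comp_def]
  rw [maxD_map_eq_foldl (fun i => ((F i).length : Int)) _ (by intro x hx; positivity)]
  set L := (PySem.List.pyRange 0 (n : Int)).foldl (fun a i => max a (((F i).length : Int))) 0 with hL
  apply List.map_congr_left
  intro k hk
  apply List.map_congr_left
  intro j hj
  rw [PySem.List.mem_pyRange_one] at hk hj
  have hkk : k = ((k.toNat : Nat) : Int) := by omega
  have hjj : j = ((j.toNat : Nat) : Int) := by omega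
  have hjn : j.toNat < n := by omega
  rw [hkk, hjj]
  rw [PySem.List.pyGetD_map_pyRange _ n _ _ hjn]
  rw [PySem.List.pyGetD_natCast, PySem.List.pyGetD_natCast]
  rw [cell_eq]
  by_cases hlt : k.toNat < (F ((j.toNat : Nat) : Int)).length
  · rw [if_pos hlt, if_pos (show ((k.toNat : Nat) : Int) < ((F ((j.toNat : Nat) : Int)).length : Int) by exact_mod_cast hlt)]
  · rw [if_neg hlt, if_neg (show ¬ ((k.toNat : Nat) : Int) < ((F ((j.toNat : Nat) : Int)).length : Int) from fun h => hlt (by exact_mod_cast h))]
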